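-- pv_equiv track=rewrite | github.com/Andreiutz/Bachelor-s-Project | machine-learning/model/statistics/utils.py | process_pitches
-- ===== SOURCE A (Python) =====
-- def process_pitches(pred_pitch_list, gt_pitch_list):
--     i = 0
--     j = 0
--     while i < len(pred_pitch_list) and j < len(gt_pitch_list):
--         if pred_pitch_list[i] > gt_pitch_list[j]:
--             pred_pitch_list = pred_pitch_list[:i] + [0] + pred_pitch_list[i:]
--         elif pred_pitch_list[i] < gt_pitch_list[j]:
--             gt_pitch_list = gt_pitch_list[:j] + [0] + gt_pitch_list[j:]
--
--         i += 1
--         j += 1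
--     ppllen = len(pred_pitch_list)
--     gpllen = len(gt_pitch_list)
--     pred_pitch_list += [0] * (gpllen-j)
--     gt_pitch_list += [0] * (ppllen-i)
--     return pred_pitch_list, gt_pitch_list
-- ===== SOURCE B (Python) =====
-- def process_pitches(pred_pitch_list, gt_pitch_list):
--     p_out = []
--     g_out = []
--     i = 0
--     j = 0
--     while i < len(pred_pitch_list) and j < len(gt_pitch_list):
--         a = pred_pitch_list[i]
--         b = gt_pitch_list[j]
--         if a > b:
--             p_out.append(0)
--             g_out.append(b)
--             j += 1
--         elif a < b:
--             p_out.append(a)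
--             g_out.append(0)
--             i += 1
--         else:
--             p_out.append(a)
--             g_out.append(b)
--             i += 1
--             j += 1
--     rest_p = pred_pitch_list[i:]
--     rest_g = gt_pitch_list[j:]
--     p_out += rest_p + [0] * len(rest_g)
--     g_out += rest_g + [0] * len(rest_p)
--     return p_out, g_out
-- ===== Notes on version B (the rewrite author's own statement) =====
-- stated objective: faster
-- what changed: Replaces A's repeated O(n) slice-insertions of zeros into the input lists by a single-pass two-pointer merge that appends to fresh output lists.
import Mathlib
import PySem

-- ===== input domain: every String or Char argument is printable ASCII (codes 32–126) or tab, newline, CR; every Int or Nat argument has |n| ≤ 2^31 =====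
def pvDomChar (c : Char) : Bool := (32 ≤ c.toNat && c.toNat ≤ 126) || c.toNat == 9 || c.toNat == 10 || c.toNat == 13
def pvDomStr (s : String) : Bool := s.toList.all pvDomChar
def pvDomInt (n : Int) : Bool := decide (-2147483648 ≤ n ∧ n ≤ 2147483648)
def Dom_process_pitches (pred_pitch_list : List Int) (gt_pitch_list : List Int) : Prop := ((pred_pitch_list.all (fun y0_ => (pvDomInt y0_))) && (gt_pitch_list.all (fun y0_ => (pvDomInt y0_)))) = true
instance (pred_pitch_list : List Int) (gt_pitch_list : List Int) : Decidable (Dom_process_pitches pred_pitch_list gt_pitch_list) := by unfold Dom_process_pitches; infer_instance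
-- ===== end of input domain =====

-- B replaces A's quadratic slice-insertions by a linear two-pointer merge appending to fresh
-- output lists (objective: faster). Return-value equivalence only: A may extend its argument
-- lists in place via `+=` when no rebinding slice-insert occurred; B never mutates its arguments.

-- ===== PORT A =====
-- A's while loop: state (pred, gt, i, j); the slice pred[:i] + [0] + pred[i:] is ported as
-- take/drop (exact since 0 ≤ i); pred[i] / gt[j] are read only under the guard, so the
-- pyGet? ... .getD 0 never takes its default.
def ppLoopA (pred gt : List Int) (i j : Nat) : List Int × List Int × Nat × Nat :=
  if h : i < pred.length ∧ j < gt.length then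
    let a := (PySem.List.pyGet? pred (i : Int)).getD 0
    let b := (PySem.List.pyGet? gt (j : Int)).getD 0
    if a > b then
      ppLoopA (pred.take i ++ [0] ++ pred.drop i) gt (i+1) (j+1)
    else if a < b then
      ppLoopA pred (gt.take j ++ [0] ++ gt.drop j) (i+1) (j+1)
    else
      ppLoopA pred gt (i+1) (j+1)
  else (pred, gt, i, j)
termination_by pred.length + gt.length - i - j
decreasing_by all_goals (simp_all; omega)

def process_pitches (pred_pitch_list : List Int) (gt_pitch_list : List Int) : List Int × List Int :=
  match ppLoopA pred_pitch_list gt_pitch_list 0 0 with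
  | (p, g, i, j) =>
    let ppllen := p.length
    let gpllen := g.length
    -- Python `[0] * (gpllen - j)`: empty for a non-positive count = Nat subtraction here
    (p ++ List.replicate (gpllen - j) 0, g ++ List.replicate (ppllen - i) 0)

-- ===== PORT B =====
-- Source B's while loop: indices i, j into the (unchanged) inputs, appending to p_out / g_out;
-- then the tail of the non-exhausted list plus zero padding is appended to each.
def ppLoopB (pred gt : List Int) (i j : Nat) (pout gout : List Int) : List Int × List Int :=
  if h : i < pred.length ∧ j < gt.length then
    let a := (PySem.List.pyGet? pred (i : Int)).getD 0
    let b := (PySem.List.pyGet? gt (j : Int)).getD 0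
    if a > b then ppLoopB pred gt i (j+1) (pout ++ [0]) (gout ++ [b])
    else if a < b then ppLoopB pred gt (i+1) j (pout ++ [a]) (gout ++ [0])
    else ppLoopB pred gt (i+1) (j+1) (pout ++ [a]) (gout ++ [b])
  else
    let restP := pred.drop i
    let restG := gt.drop j
    (pout ++ (restP ++ List.replicate restG.length 0),
     gout ++ (restG ++ List.replicate restP.length 0))
termination_by (pred.length - i) + (gt.length - j)
decreasing_by all_goals omega

def process_pitches_alt (pred_pitch_list : List Int) (gt_pitch_list : List Int) : List Int × List Int :=
  ppLoopB pred_pitch_list gt_pitch_list 0 0 [] []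

-- ===== PRECONDITION & SPEC =====
def Spec_process_pitches (pred_pitch_list : List Int) (gt_pitch_list : List Int) (out : List Int × List Int) : Prop := out = process_pitches_alt pred_pitch_list gt_pitch_list
instance (pred_pitch_list : List Int) (gt_pitch_list : List Int) (out : List Int × List Int) : Decidable (Spec_process_pitches pred_pitch_list gt_pitch_list out) := by unfold Spec_process_pitches; infer_instance

-- ===== CLAIM (what is proved, stated in full; the proofs are below) =====
def Claim_equal_process_pitches : Prop := ∀ (pred_pitch_list : List Int) (gt_pitch_list : List Int), Dom_process_pitches pred_pitch_list gt_pitch_list → Spec_process_pitches pred_pitch_list gt_pitch_list (process_pitches pred_pitch_list gt_pitch_list)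

-- ===== LEMMAS AND PROOFS =====

-- Proof-level core: the common recursive description of what both programs compute, with the
-- already-emitted prefixes stripped off.
def ppCore : List Int → List Int → List Int × List Int
  | a :: ps, b :: gs =>
    if a > b then
      match ppCore (a :: ps) gs with
      | (p, g) => (0 :: p, b :: g)
    else if a < b then
      match ppCore ps (b :: gs) with
      | (p, g) => (a :: p, 0 :: g)
    else
      match ppCore ps gs with
      | (p, g) => (a :: p, b :: g)
  | ps, gs => (ps ++ List.replicate gs.length 0, gs ++ List.replicate ps.length 0)
termination_by ps gs => ps.length + gs.length

lemma ppLoopB_eq_core (pred gt : List Int) (i j : Nat) (pout gout : List Int) :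
    ppLoopB pred gt i j pout gout =
      (pout ++ (ppCore (pred.drop i) (gt.drop j)).1,
       gout ++ (ppCore (pred.drop i) (gt.drop j)).2) := by
  fun_induction ppLoopB pred gt i j pout gout with
  | case1 i j pout gout h a b hab ih =>
    obtain ⟨hi, hj⟩ := h
    rw [List.drop_eq_getElem_cons hi, List.drop_eq_getElem_cons hj]
    have ha : a = pred[i] := by simp [a, hi]
    have hb : b = gt[j] := by simp [b, hj]
    rw [ppCore]
    rw [if_pos (ha ▸ hb ▸ hab)]
    rw [ih, ← List.drop_eq_getElem_cons hi]
    rcases hc : ppCore (pred.drop i) (gt.drop (j+1)) with ⟨p, g⟩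
    simp [hb]
  | case2 i j pout gout h a b hab hab2 ih =>
    obtain ⟨hi, hj⟩ := h
    rw [List.drop_eq_getElem_cons hi, List.drop_eq_getElem_cons hj]
    have ha : a = pred[i] := by simp [a, hi]
    have hb : b = gt[j] := by simp [b, hj]
    rw [ppCore]
    rw [if_neg (ha ▸ hb ▸ hab), if_pos (ha ▸ hb ▸ hab2)]
    rw [ih, ← List.drop_eq_getElem_cons hj]
    rcases hc : ppCore (pred.drop (i+1)) (gt.drop j) with ⟨p, g⟩
    simp [ha]
  | case3 i j pout gout h a b hab hab2 ih =>
    obtain ⟨hi, hj⟩ := h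
    rw [List.drop_eq_getElem_cons hi, List.drop_eq_getElem_cons hj]
    have ha : a = pred[i] := by simp [a, hi]
    have hb : b = gt[j] := by simp [b, hj]
    rw [ppCore]
    rw [if_neg (ha ▸ hb ▸ hab), if_neg (ha ▸ hb ▸ hab2)]
    rw [ih]
    rcases hc : ppCore (pred.drop (i+1)) (gt.drop (j+1)) with ⟨p, g⟩
    simp [ha, hb]
  | case4 i j pout gout h =>
    rename_i rP rG
    simp only [rP, rG]
    rw [ppCore.eq_def]
    rcases hp : pred.drop i with _ | ⟨a, ps⟩ <;> rcases hg : gt.drop j with _ | ⟨b, gs⟩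
    · simp
    · simp
    · simp
    · exfalso
      have h1 : i < pred.length := by
        by_contra hc; push Not at hc
        simp [List.drop_eq_nil_of_le hc] at hp
      have h2 : j < gt.length := by
        by_contra hc; push Not at hc
        simp [List.drop_eq_nil_of_le hc] at hg
      exact h ⟨h1, h2⟩

lemma ppLoopA_core (restP restG pout gout : List Int) (h : pout.length = gout.length) :
    (match ppLoopA (pout ++ restP) (gout ++ restG) pout.length gout.length with
     | (p, g, i, j) => (p ++ List.replicate (g.length - j) 0,
                        g ++ List.replicate (p.length - i) 0))
    = (pout ++ (ppCore restP restG).1, gout ++ (ppCore restP restG).2) := by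
  rcases restP with _ | ⟨a, ps⟩
  · rw [ppLoopA]
    rw [dif_neg (by simp)]
    rw [ppCore.eq_def]
    rcases restG with _ | ⟨b, gs⟩ <;> simp [h]
  · rcases restG with _ | ⟨b, gs⟩
    · rw [ppLoopA]
      rw [dif_neg (by simp)]
      rw [ppCore.eq_def]
      simp [h]
    · rw [ppLoopA]
      rw [dif_pos (by simp)]
      have ha : (PySem.List.pyGet? (pout ++ a :: ps) (pout.length : Int)).getD 0 = a := by
        simp
      have hb : (PySem.List.pyGet? (gout ++ b :: gs) (gout.length : Int)).getD 0 = b := by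
        simp
      rw [ha, hb]
      rw [ppCore]
      by_cases hab : a > b
      · rw [if_pos hab, if_pos hab]
        rw [List.take_left, List.drop_left]
        rw [show pout ++ [0] ++ a :: ps = (pout ++ [0]) ++ (a :: ps) from by simp]
        rw [show gout ++ b :: gs = (gout ++ [b]) ++ gs from by simp]
        rw [show pout.length + 1 = (pout ++ [0]).length from by simp]
        rw [show gout.length + 1 = (gout ++ [b]).length from by simp]
        rw [ppLoopA_core (a :: ps) gs (pout ++ [0]) (gout ++ [b]) (by simp [h])]
        rcases ppCore (a :: ps) gs with ⟨p, g⟩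
        simp
      · rw [if_neg hab, if_neg hab]
        by_cases hab2 : a < b
        · rw [if_pos hab2, if_pos hab2]
          rw [List.take_left, List.drop_left]
          rw [show gout ++ [0] ++ b :: gs = (gout ++ [0]) ++ (b :: gs) from by simp]
          rw [show pout.length + 1 = (pout ++ [a]).length from by simp]
          rw [show gout.length + 1 = (gout ++ [0]).length from by simp]
          rw [show pout ++ a :: ps = (pout ++ [a]) ++ ps from by simp]
          rw [ppLoopA_core ps (b :: gs) (pout ++ [a]) (gout ++ [0]) (by simp [h])]
          rcases ppCore ps (b :: gs) with ⟨p, g⟩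
          simp
        · rw [if_neg hab2, if_neg hab2]
          rw [show pout.length + 1 = (pout ++ [a]).length from by simp]
          rw [show gout.length + 1 = (gout ++ [b]).length from by simp]
          rw [show pout ++ a :: ps = (pout ++ [a]) ++ ps from by simp]
          rw [show gout ++ b :: gs = (gout ++ [b]) ++ gs from by simp]
          rw [ppLoopA_core ps gs (pout ++ [a]) (gout ++ [b]) (by simp [h])]
          rcases ppCore ps gs with ⟨p, g⟩
          simp
termination_by restP.length + restG.length

-- ===== VERDICT (by name: the statement is the Claim_ definition above) =====
theorem process_pitches_spec : Claim_equal_process_pitches := by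
  intro pred gt _
  unfold Spec_process_pitches process_pitches process_pitches_alt
  rw [ppLoopB_eq_core pred gt 0 0 [] []]
  have := ppLoopA_core pred gt [] [] rfl
  simpa using this
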